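-- pv_equiv track=rewrite | github.com/RParnell93/baseball-analytics | src/bots/challenge_impact.py | get_base_state
-- ===== SOURCE A (Python) =====
-- def get_base_state(play):
--     """Extract base runners from play data as (1st, 2nd, 3rd) tuple of 0/1."""
--     runners = play.get("runners", [])
--     # Look at the movement details to determine who was on base at pitch time
--     # Alternatively, use the matchup/runners from the play start
--     on_1b = 0
--     on_2b = 0
--     on_3b = 0
--
--     for runner in runners:
--         start = runner.get("movement", {}).get("originBase")
--         if start == "1B":
--             on_1b = 1
--         elif start == "2B":
--             on_2b = 1
--         elif start == "3B":
--             on_3b = 1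
--
--     return (on_1b, on_2b, on_3b)
-- ===== SOURCE B (Python) =====
-- def get_base_state(play):
--     """Extract base runners from play data as (1st, 2nd, 3rd) tuple of 0/1."""
--     runners = play.get("runners", [])
--
--     def occupied(base):
--         return int(any(r.get("movement", {}).get("originBase") == base
--                        for r in runners))
--
--     return (occupied("1B"), occupied("2B"), occupied("3B"))
-- ===== Notes on version B (the rewrite author's own statement) =====
-- stated objective: idiomatic
-- what changed: Inverts the traversal: instead of one pass over runners maintaining three flags, B makes one short-circuiting any() scan of the runners per base ('1B','2B','3B'), so no mutable flag state exists.
import Mathlib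
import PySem

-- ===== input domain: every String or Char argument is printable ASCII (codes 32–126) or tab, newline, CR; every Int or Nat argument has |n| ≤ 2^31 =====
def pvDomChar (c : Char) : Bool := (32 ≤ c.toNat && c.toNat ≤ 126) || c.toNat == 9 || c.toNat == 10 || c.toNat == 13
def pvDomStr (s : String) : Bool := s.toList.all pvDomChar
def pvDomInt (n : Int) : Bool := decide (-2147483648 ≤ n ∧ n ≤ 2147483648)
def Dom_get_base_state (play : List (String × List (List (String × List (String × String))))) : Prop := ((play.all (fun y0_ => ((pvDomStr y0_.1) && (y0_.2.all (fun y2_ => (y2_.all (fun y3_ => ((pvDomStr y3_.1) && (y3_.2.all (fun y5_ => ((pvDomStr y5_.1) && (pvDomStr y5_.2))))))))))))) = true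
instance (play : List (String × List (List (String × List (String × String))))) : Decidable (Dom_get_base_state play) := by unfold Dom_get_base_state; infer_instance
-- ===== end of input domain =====

-- B inverts the traversal: a short-circuiting any() scan of the runners per base,
-- instead of A's single pass that mutates three flags (idiomatic; same return value).

-- ===== PORT A =====
-- runner.get("movement", {}).get("originBase")
def pvOrigin (runner : List (String × List (String × String))) : Option String :=
  (PySem.Dict.mk ((PySem.Dict.mk runner).getD "movement" [])).get? "originBase"

def get_base_state (play : List (String × List (List (String × List (String × String))))) : Int × Int × Int :=
  let runners := (PySem.Dict.mk play).getD "runners" []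
  let st := runners.foldl (fun (st : Int × Int × Int) runner =>
    let start := pvOrigin runner
    if start == some "1B" then (1, st.2.1, st.2.2)
    else if start == some "2B" then (st.1, 1, st.2.2)
    else if start == some "3B" then (st.1, st.2.1, 1)
    else st) (0, 0, 0)
  st

-- ===== PORT B =====
def get_base_state_alt (play : List (String × List (List (String × List (String × String))))) : Int × Int × Int :=
  let runners := (PySem.Dict.mk play).getD "runners" []
  -- occupied(base) = int(any(origin == base for r in runners)); List.any short-circuits like any()
  let occupied := fun (base : String) =>
    if runners.any (fun r => pvOrigin r == some base) then (1 : Int) else 0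
  (occupied "1B", occupied "2B", occupied "3B")

-- ===== PRECONDITION & SPEC =====
def Spec_get_base_state (play : List (String × List (List (String × List (String × String))))) (out : Int × Int × Int) : Prop := out = get_base_state_alt play
instance (play : List (String × List (List (String × List (String × String))))) (out : Int × Int × Int) : Decidable (Spec_get_base_state play out) := by unfold Spec_get_base_state; infer_instance

-- ===== CLAIM (what is proved, stated in full; the proofs are below) =====
def Claim_equal_get_base_state : Prop := ∀ (play : List (String × List (List (String × List (String × String))))), Dom_get_base_state play → Spec_get_base_state play (get_base_state play)

-- ===== LEMMAS AND PROOFS =====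
-- A's fold, characterised: each flag ends at 1 iff some runner's origin equals the matching base.
theorem foldA_char (rs : List (List (String × List (String × String)))) (st : Int × Int × Int) :
    rs.foldl (fun (st : Int × Int × Int) runner =>
      let start := pvOrigin runner
      if start == some "1B" then (1, st.2.1, st.2.2)
      else if start == some "2B" then (st.1, 1, st.2.2)
      else if start == some "3B" then (st.1, st.2.1, 1)
      else st) st
    = ((if rs.any (fun r => pvOrigin r == some "1B") then 1 else st.1),
       (if rs.any (fun r => pvOrigin r == some "2B") then 1 else st.2.1),
       (if rs.any (fun r => pvOrigin r == some "3B") then 1 else st.2.2)) := by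
  induction rs generalizing st with
  | nil => simp
  | cons r rs ih =>
    simp only [List.foldl_cons, List.any_cons, ih]
    by_cases h1 : pvOrigin r = some "1B" <;> by_cases h2 : pvOrigin r = some "2B" <;>
      by_cases h3 : pvOrigin r = some "3B" <;> simp_all [beq_iff_eq]

-- ===== VERDICT (by name: the statement is the Claim_ definition above) =====
theorem get_base_state_spec : Claim_equal_get_base_state := by
  intro play _
  show get_base_state play = get_base_state_alt play
  unfold get_base_state get_base_state_alt
  simp only [foldA_char]
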